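-- pv_equiv track=rewrite | github.com/kys061/kr-stock-skills | skills/kr-strategy-pivot/scripts/generate_pivots.py | identify_current_archetype
-- ===== SOURCE A (Python) =====
-- ARCHETYPE_CATALOG = {
--     'trend_following_breakout': {
--         'hypothesis_type': 'breakout',
--         'entry_family': 'pivot_breakout',
--         'compatible_pivots': ['mean_reversion_pullback',
--                               'volatility_contraction'],
--     },
--     'mean_reversion_pullback': {
--         'hypothesis_type': 'panic_reversal',
--         'entry_family': '',
--         'compatible_pivots': ['trend_following_breakout',
--                               'statistical_pairs'],
--     },
--     'earnings_drift_pead': {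
--         'hypothesis_type': 'earnings_drift',
--         'entry_family': 'gap_up_continuation',
--         'compatible_pivots': ['event_driven_fade',
--                               'sector_rotation_momentum'],
--     },
--     'volatility_contraction': {
--         'hypothesis_type': 'breakout',
--         'entry_family': 'pivot_breakout',
--         'compatible_pivots': ['trend_following_breakout',
--                               'regime_conditional_carry'],
--     },
--     'regime_conditional_carry': {
--         'hypothesis_type': 'regime_shift',
--         'entry_family': '',
--         'compatible_pivots': ['trend_following_breakout',
--                               'sector_rotation_momentum'],
--     },
--     'sector_rotation_momentum': {
--         'hypothesis_type': 'sector_x_stock',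
--         'entry_family': '',
--         'compatible_pivots': ['earnings_drift_pead',
--                               'trend_following_breakout'],
--     },
--     'event_driven_fade': {
--         'hypothesis_type': 'news_reaction',
--         'entry_family': '',
--         'compatible_pivots': ['earnings_drift_pead',
--                               'mean_reversion_pullback'],
--     },
--     'statistical_pairs': {
--         'hypothesis_type': 'sector_x_stock',
--         'entry_family': '',
--         'compatible_pivots': ['mean_reversion_pullback',
--                               'regime_conditional_carry'],
--     },
-- }
--
-- def identify_current_archetype(draft: dict) -> str:
--     """현재 드래프트에서 아키타입 식별.
--
--     Args:
--         draft: 전략 드래프트 dict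
--
--     Returns:
--         아키타입 이름
--     """
--     hypothesis = draft.get('hypothesis_type', '')
--     entry_family = draft.get('entry_family', '')
--
--     for name, info in ARCHETYPE_CATALOG.items():
--         if (info.get('hypothesis_type') == hypothesis
--                 and info.get('entry_family') == entry_family):
--             return name
--
--     # 가설 유형 기반 폴백
--     for name, info in ARCHETYPE_CATALOG.items():
--         if info.get('hypothesis_type') == hypothesis:
--             return name
--
--     return 'trend_following_breakout'
-- ===== SOURCE B (Python) =====
-- ARCHETYPE_CATALOG = {
--     'trend_following_breakout': {
--         'hypothesis_type': 'breakout',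
--         'entry_family': 'pivot_breakout',
--         'compatible_pivots': ['mean_reversion_pullback',
--                               'volatility_contraction'],
--     },
--     'mean_reversion_pullback': {
--         'hypothesis_type': 'panic_reversal',
--         'entry_family': '',
--         'compatible_pivots': ['trend_following_breakout',
--                               'statistical_pairs'],
--     },
--     'earnings_drift_pead': {
--         'hypothesis_type': 'earnings_drift',
--         'entry_family': 'gap_up_continuation',
--         'compatible_pivots': ['event_driven_fade',
--                               'sector_rotation_momentum'],
--     },
--     'volatility_contraction': {
--         'hypothesis_type': 'breakout',
--         'entry_family': 'pivot_breakout',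
--         'compatible_pivots': ['trend_following_breakout',
--                               'regime_conditional_carry'],
--     },
--     'regime_conditional_carry': {
--         'hypothesis_type': 'regime_shift',
--         'entry_family': '',
--         'compatible_pivots': ['trend_following_breakout',
--                               'sector_rotation_momentum'],
--     },
--     'sector_rotation_momentum': {
--         'hypothesis_type': 'sector_x_stock',
--         'entry_family': '',
--         'compatible_pivots': ['earnings_drift_pead',
--                               'trend_following_breakout'],
--     },
--     'event_driven_fade': {
--         'hypothesis_type': 'news_reaction',
--         'entry_family': '',
--         'compatible_pivots': ['earnings_drift_pead',
--                               'mean_reversion_pullback'],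
--     },
--     'statistical_pairs': {
--         'hypothesis_type': 'sector_x_stock',
--         'entry_family': '',
--         'compatible_pivots': ['mean_reversion_pullback',
--                               'regime_conditional_carry'],
--     },
-- }
--
--
-- def _match_score(info, hypothesis, entry_family):
--     """2 = hypothesis and entry family both match, 1 = hypothesis only, 0 = no match."""
--     if info['hypothesis_type'] != hypothesis:
--         return 0
--     return 2 if info['entry_family'] == entry_family else 1
--
--
-- def identify_current_archetype(draft: dict) -> str:
--     """Single scoring pass: keep the first archetype with the highest match
--     score; if nothing matches at all, the default archetype stands."""
--     hypothesis = draft.get('hypothesis_type', '')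
--     entry_family = draft.get('entry_family', '')
--
--     best_name = 'trend_following_breakout'
--     best_score = 0
--     for name, info in ARCHETYPE_CATALOG.items():
--         score = _match_score(info, hypothesis, entry_family)
--         if score > best_score:
--             best_name, best_score = name, score
--     return best_name
-- ===== Notes on version B (the rewrite author's own statement) =====
-- stated objective: alternative
-- what changed: Replaces A's two staged scans of the catalog (exact pair match, then hypothesis-only fallback) with a single scoring pass: each archetype is scored 2/1/0 and the first archetype with the maximal positive score is kept by an accumulator, defaulting to 'trend_following_breakout'.
import Mathlib
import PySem

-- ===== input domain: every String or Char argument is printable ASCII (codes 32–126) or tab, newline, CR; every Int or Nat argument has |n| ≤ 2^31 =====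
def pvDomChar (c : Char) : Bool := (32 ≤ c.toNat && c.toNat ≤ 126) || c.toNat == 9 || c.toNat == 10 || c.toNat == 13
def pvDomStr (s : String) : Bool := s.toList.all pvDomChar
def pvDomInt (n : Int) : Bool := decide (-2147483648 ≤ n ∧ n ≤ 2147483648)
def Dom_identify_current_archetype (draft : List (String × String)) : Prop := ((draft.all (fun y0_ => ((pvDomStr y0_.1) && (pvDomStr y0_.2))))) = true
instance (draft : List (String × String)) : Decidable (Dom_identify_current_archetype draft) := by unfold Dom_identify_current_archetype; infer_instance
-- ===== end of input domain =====

-- B replaces A's two staged scans of the catalog by a single scoring pass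
-- (score 2/1/0 per archetype, first maximum kept by an accumulator); objective: alternative.

-- ===== PORT A =====
-- ARCHETYPE_CATALOG as (name, hypothesis_type, entry_family); the 'compatible_pivots'
-- field is never read by the function and is omitted from the port.
def pyArchetypeCatalog : List (String × String × String) :=
  [("trend_following_breakout", "breakout", "pivot_breakout"),
   ("mean_reversion_pullback", "panic_reversal", ""),
   ("earnings_drift_pead", "earnings_drift", "gap_up_continuation"),
   ("volatility_contraction", "breakout", "pivot_breakout"),
   ("regime_conditional_carry", "regime_shift", ""),
   ("sector_rotation_momentum", "sector_x_stock", ""),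
   ("event_driven_fade", "news_reaction", ""),
   ("statistical_pairs", "sector_x_stock", "")]

-- first loop of A: first name whose hypothesis_type AND entry_family both match
def aFindExact (hypothesis entry_family : String) : List (String × String × String) → Option String
  | [] => none
  | (name, ht, ef) :: rest =>
      if ht == hypothesis && ef == entry_family then some name
      else aFindExact hypothesis entry_family rest

-- second loop of A: first name whose hypothesis_type matches (fallback)
def aFindHyp (hypothesis : String) : List (String × String × String) → Option String
  | [] => none
  | (name, ht, _) :: rest =>
      if ht == hypothesis then some name else aFindHyp hypothesis rest

def identify_current_archetype (draft : List (String × String)) : String :=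
  let hypothesis := PySem.Dict.getD (PySem.Dict.mk draft) "hypothesis_type" ""
  let entry_family := PySem.Dict.getD (PySem.Dict.mk draft) "entry_family" ""
  match aFindExact hypothesis entry_family pyArchetypeCatalog with
  | some name => name
  | none =>
      match aFindHyp hypothesis pyArchetypeCatalog with
      | some name => name
      | none => "trend_following_breakout"

-- ===== PORT B =====
-- _match_score: 2 = both fields match, 1 = hypothesis only, 0 = no match
def bMatchScore (ht ef hypothesis entry_family : String) : Nat :=
  if ht != hypothesis then 0
  else if ef == entry_family then 2 else 1

def identify_current_archetype_alt (draft : List (String × String)) : String :=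
  let hypothesis := PySem.Dict.getD (PySem.Dict.mk draft) "hypothesis_type" ""
  let entry_family := PySem.Dict.getD (PySem.Dict.mk draft) "entry_family" ""
  (pyArchetypeCatalog.foldl
    (fun best entry =>
      let (name, ht, ef) := entry
      let score := bMatchScore ht ef hypothesis entry_family
      if score > best.2 then (name, score) else best)
    ("trend_following_breakout", 0)).1

-- ===== PRECONDITION & SPEC =====
def Spec_identify_current_archetype (draft : List (String × String)) (out : String) : Prop := out = identify_current_archetype_alt draft
instance (draft : List (String × String)) (out : String) : Decidable (Spec_identify_current_archetype draft out) := by unfold Spec_identify_current_archetype; infer_instance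

-- ===== CLAIM (what is proved, stated in full; the proofs are below) =====
def Claim_equal_identify_current_archetype : Prop := ∀ (draft : List (String × String)), Dom_identify_current_archetype draft → Spec_identify_current_archetype draft (identify_current_archetype draft)

-- ===== LEMMAS AND PROOFS =====

-- the core equality, over the already-extracted field values.
-- Per hypothesis value: catalog entries with a different hypothesis_type score 0
-- and never displace the accumulator, so only the (at most two) matching entries
-- and their entry_family comparison remain after substitution.
set_option maxHeartbeats 1000000 in
theorem core_eq (h e : String) :
    (match aFindExact h e pyArchetypeCatalog with
     | some name => name
     | none =>
         match aFindHyp h pyArchetypeCatalog with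
         | some name => name
         | none => "trend_following_breakout") =
    (pyArchetypeCatalog.foldl
      (fun best entry =>
        let (name, ht, ef) := entry
        let score := bMatchScore ht ef h e
        if score > best.2 then (name, score) else best)
      ("trend_following_breakout", 0)).1 := by
  by_cases h1 : "breakout" = h
  · subst h1
    by_cases e1 : "pivot_breakout" = e <;>
      simp_all [aFindExact, aFindHyp, pyArchetypeCatalog, bMatchScore, List.foldl]
  by_cases h2 : "panic_reversal" = h
  · subst h2
    by_cases e1 : "" = e <;>
      simp_all [aFindExact, aFindHyp, pyArchetypeCatalog, bMatchScore, List.foldl]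
  by_cases h3 : "earnings_drift" = h
  · subst h3
    by_cases e1 : "gap_up_continuation" = e <;>
      simp_all [aFindExact, aFindHyp, pyArchetypeCatalog, bMatchScore, List.foldl]
  by_cases h4 : "regime_shift" = h
  · subst h4
    by_cases e1 : "" = e <;>
      simp_all [aFindExact, aFindHyp, pyArchetypeCatalog, bMatchScore, List.foldl]
  by_cases h5 : "sector_x_stock" = h
  · subst h5
    by_cases e1 : "" = e <;>
      simp_all [aFindExact, aFindHyp, pyArchetypeCatalog, bMatchScore, List.foldl]
  by_cases h6 : "news_reaction" = h
  · subst h6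
    by_cases e1 : "" = e <;>
      simp_all [aFindExact, aFindHyp, pyArchetypeCatalog, bMatchScore, List.foldl]
  simp_all [aFindExact, aFindHyp, pyArchetypeCatalog, bMatchScore, List.foldl]

-- ===== VERDICT (by name: the statement is the Claim_ definition above) =====
theorem identify_current_archetype_spec : Claim_equal_identify_current_archetype := by
  intro draft _
  unfold Spec_identify_current_archetype identify_current_archetype identify_current_archetype_alt
  exact core_eq _ _
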